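-- pv_equiv track=rewrite | github.com/rugved-mahamune/interview-practice | 3palindromes.py | threePalindromicSubstrings
-- ===== SOURCE A (Python) =====
-- def threePalindromicSubstrings(word = ""):
--     # Write your code here
--     final = []
--     exist = [0] * len(word)
--     got = {}
--     for i in range(len(word)):
--         if(palingdrome(word,0,i)):
--             final.append(word[0:i+1])
--             got[word[0:i+1]] = (0,i)
--         for j in range(i+1,len(word)):
--             if(palingdrome(word,i+1,j)):
--                 final.append(word[i+1:j+1])
--                 got[word[i+1:j+1]] = (i+1,j)
--
--     for i in final:
--         if(exist[got[i][0]] > 0 or exist[got[i][1]] > 0):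
--             final.remove(i)
--         else:
--             exist[got[i][0]] = 1
--             exist[got[i][1]] = 1
--     final = sorted(final, key=len)
--     return final[-3:]
--
-- def palingdrome(word,ini,end):
--     while(ini <= end):
--         if(word[ini] == word[end]):
--             ini+=1
--             end-=1
--         else:
--             return False
--     return True
-- ===== SOURCE B (Python) =====
-- def threePalindromicSubstrings(word = ""):
--     n = len(word)
--     # dynamic-programming palindrome table: is_pal[s][e] is True iff word[s:e+1] is a palindrome
--     is_pal = [[False] * n for _ in range(n)]
--     for e in range(n):
--         for s in range(e, -1, -1):
--             is_pal[s][e] = word[s] == word[e] and (e - s < 2 or is_pal[s + 1][e - 1])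
--     final = []
--     got = {}
--     for i in range(n):
--         if is_pal[0][i]:
--             final.append(word[:i + 1])
--             got[word[:i + 1]] = (0, i)
--         for j in range(i + 1, n):
--             if is_pal[i + 1][j]:
--                 final.append(word[i + 1:j + 1])
--                 got[word[i + 1:j + 1]] = (i + 1, j)
--     exist = [0] * n
--     for t in final:
--         s, e = got[t]
--         if exist[s] or exist[e]:
--             final.remove(t)
--         else:
--             exist[s] = 1
--             exist[e] = 1
--     final.sort(key=len)
--     return final[-3:]
-- ===== Notes on version B (the rewrite author's own statement) =====
-- stated objective: alternative
-- what changed: B precomputes an O(n^2) dynamic-programming palindrome table (is_pal[s][e] from is_pal[s+1][e-1]) and the enumeration consults it in O(1), instead of A's per-substring two-pointer palindrome scan; the de-overlap filter and length sort are unchanged.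
import Mathlib
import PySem

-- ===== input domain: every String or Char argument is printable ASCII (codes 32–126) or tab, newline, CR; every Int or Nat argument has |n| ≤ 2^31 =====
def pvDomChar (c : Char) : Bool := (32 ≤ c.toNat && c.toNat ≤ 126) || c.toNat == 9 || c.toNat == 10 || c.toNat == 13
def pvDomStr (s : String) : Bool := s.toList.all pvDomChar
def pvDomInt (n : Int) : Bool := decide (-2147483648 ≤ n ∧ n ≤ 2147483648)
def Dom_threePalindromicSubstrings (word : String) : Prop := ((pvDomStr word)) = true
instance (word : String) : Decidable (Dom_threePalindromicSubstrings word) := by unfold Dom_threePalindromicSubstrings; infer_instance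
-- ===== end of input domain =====

-- B replaces A's per-substring two-pointer palindrome scan by a precomputed O(n^2)
-- dynamic-programming palindrome table consulted in O(1); the de-overlap filter and the
-- length sort are unchanged.  Objective: alternative.  No argument is mutated.


-- generation state of both Pythons: the `final` list and the `got` dict
-- (Python's (int,int) index pairs are represented as Nat × Nat: all stored indices are nonnegative)
def GenSt : Type := List (List Char) × PySem.Dict (List Char) (Nat × Nat)

-- the tail both Pythons share verbatim: the for-loop over `final` that removes overlapping entries
-- while iterating (ported with CPython's cursor semantics: the cursor advances past the shifted
-- element after a removal; list.remove = erase of the first occurrence, which is present here),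
-- then the sort by length and [-3:].  `exist` reads/writes are in range in every reachable call,
-- so getD/set are exact.
def removePass (got : PySem.Dict (List Char) (Nat × Nat)) (final : List (List Char))
    (exist : List Int) (k : Nat) : List (List Char) :=
  if h : k < final.length then
    let x := final[k]
    let p := got.getD x (0, 0)
    if exist.getD p.1 0 > 0 || exist.getD p.2 0 > 0 then
      removePass got (final.erase x) exist (k + 1)
    else
      removePass got final ((exist.set p.1 1).set p.2 1) (k + 1)
  else final
termination_by final.length - k
decreasing_by
  · have hx : final[k] ∈ final := List.getElem_mem h
    have := List.length_erase_of_mem hx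
    omega
  · omega

def finishPass (g : GenSt) (n : Nat) : List String :=
  let final := removePass g.2 g.1 (List.replicate n 0) 0
  (PySem.List.slice (PySem.List.sorted final (fun t => t.length) false) (some (-3)) none).map
    String.ofList

-- ===== PORT A =====
-- A's helper `palingdrome(word, ini, end)`: two pointers moving inwards.  Every call keeps
-- 0 ≤ ini and end < len(word) while ini ≤ end, so Nat indices with getD are exact (the crossing
-- ini = end ± 1 behaves identically for Int and clamped Nat arithmetic here).
def palingdromeA (cs : List Char) (ini fin : Nat) : Bool :=
  if _h : ini ≤ fin then
    if cs.getD ini ' ' == cs.getD fin ' ' then palingdromeA cs (ini + 1) (fin - 1)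
    else false
  else true
termination_by fin + 1 - ini

-- one iteration of A's outer loop: the word[0:i+1] check, then the inner j-scan
def stepA (cs : List Char) (n : Nat) (st : GenSt) (i : Nat) : GenSt :=
  let st1 :=
    if palingdromeA cs 0 i then
      (st.1 ++ [(cs.drop 0).take (i + 1 - 0)],
       st.2.insert ((cs.drop 0).take (i + 1 - 0)) (0, i))
    else st
  (List.range' (i + 1) (n - (i + 1))).foldl
    (fun st' j =>
      if palingdromeA cs (i + 1) j then
        (st'.1 ++ [(cs.drop (i + 1)).take (j + 1 - (i + 1))],
         st'.2.insert ((cs.drop (i + 1)).take (j + 1 - (i + 1))) (i + 1, j))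
      else st')
    st1

def threePalindromicSubstrings (word : String) : List String :=
  finishPass
    ((List.range word.toList.length).foldl (stepA word.toList word.toList.length)
      ([], PySem.Dict.empty))
    word.toList.length

-- ===== PORT B =====
-- Source B's table lookup is_pal[s][e]; every read/write is in range, so getD is exact
def tget (T : List (List Bool)) (s e : Nat) : Bool := (T.getD s []).getD e false

-- Source B's DP construction: for e in range(n): for s in range(e,-1,-1): is_pal[s][e] = …
-- (range(e,-1,-1) enumerates e, e-1, …, 0, which is (List.range (e+1)).reverse)
def buildTable (cs : List Char) : List (List Bool) :=
  (List.range cs.length).foldl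
    (fun T e =>
      ((List.range (e + 1)).reverse).foldl
        (fun T' s =>
          T'.set s ((T'.getD s []).set e
            ((cs.getD s ' ' == cs.getD e ' ') &&
             (decide (e - s < 2) || tget T' (s + 1) (e - 1)))))
        T)
    (List.replicate cs.length (List.replicate cs.length false))

-- one iteration of Source B's enumeration loop: the word[:i+1] check, then the inner j-scan,
-- both answered by the table
def stepB (cs : List Char) (T : List (List Bool)) (st : GenSt) (i : Nat) : GenSt :=
  let st1 :=
    if tget T 0 i then
      (st.1 ++ [cs.take (i + 1)], st.2.insert (cs.take (i + 1)) (0, i))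
    else st
  (List.range' (i + 1) (cs.length - (i + 1))).foldl
    (fun st' j =>
      if tget T (i + 1) j then
        (st'.1 ++ [(cs.drop (i + 1)).take (j + 1 - (i + 1))],
         st'.2.insert ((cs.drop (i + 1)).take (j + 1 - (i + 1))) (i + 1, j))
      else st')
    st1

def threePalindromicSubstrings_alt (word : String) : List String :=
  finishPass
    ((List.range word.toList.length).foldl (stepB word.toList (buildTable word.toList))
      ([], PySem.Dict.empty))
    word.toList.length

-- ===== PRECONDITION & SPEC =====
def Spec_threePalindromicSubstrings (word : String) (out : List String) : Prop := out = threePalindromicSubstrings_alt word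
instance (word : String) (out : List String) : Decidable (Spec_threePalindromicSubstrings word out) := by unfold Spec_threePalindromicSubstrings; infer_instance

-- ===== CLAIM (what is proved, stated in full; the proofs are below) =====
def Claim_equal_threePalindromicSubstrings : Prop := ∀ (word : String), Dom_threePalindromicSubstrings word → Spec_threePalindromicSubstrings word (threePalindromicSubstrings word)

-- ===== LEMMAS AND PROOFS =====

-- A's two-pointer test satisfies the DP recurrence
lemma pal_rec (cs : List Char) (s e : Nat) (hse : s ≤ e) :
    palingdromeA cs s e
      = ((cs.getD s ' ' == cs.getD e ' ') && (decide (e - s < 2) || palingdromeA cs (s + 1) (e - 1))) := by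
  rw [palingdromeA, dif_pos hse]
  by_cases hc : cs.getD s ' ' == cs.getD e ' '
  · rw [if_pos hc, hc]
    by_cases h2 : e - s < 2
    · have hstop : palingdromeA cs (s + 1) (e - 1) = true := by
        rw [palingdromeA, dif_neg (by omega)]
      simp [h2, hstop]
    · simp [h2]
  · have hc' : (cs.getD s ' ' == cs.getD e ' ') = false := by simpa using hc
    rw [hc']
    simp

-- structural facts about one inner DP assignment and the inner fold

def innerF (cs : List Char) (e : Nat) (T : List (List Bool)) (s : Nat) : List (List Bool) :=
  T.set s ((T.getD s []).set e
    ((cs.getD s ' ' == cs.getD e ' ') && (decide (e - s < 2) || tget T (s + 1) (e - 1))))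

lemma tget_set (T : List (List Bool)) (s e s' e' : Nat) (v : Bool)
    (hs : s < T.length) (he : e < (T.getD s []).length) :
    tget (T.set s ((T.getD s []).set e v)) s' e'
      = if s' = s ∧ e' = e then v else tget T s' e' := by
  unfold tget
  by_cases hss : s' = s
  · subst hss
    have hs2 : s' < (T.set s' ((T.getD s' []).set e v)).length := by
      rw [List.length_set]; exact hs
    have h1 : (T.set s' ((T.getD s' []).set e v)).getD s' [] = (T.getD s' []).set e v := by
      rw [List.getD_eq_getElem _ _ hs2, List.getElem_set_self]
    rw [h1]
    by_cases hee : e' = e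
    · subst hee
      have he2 : e' < ((T.getD s' []).set e' v).length := by
        rw [List.length_set]; exact he
      rw [List.getD_eq_getElem _ _ he2, List.getElem_set_self, if_pos ⟨rfl, rfl⟩]
    · simp only [hee, and_false, if_false]
      by_cases he' : e' < (T.getD s' []).length
      · have he2 : e' < ((T.getD s' []).set e v).length := by
          rw [List.length_set]; exact he'
        rw [List.getD_eq_getElem _ _ he2, List.getElem_set_ne (by omega),
          List.getD_eq_getElem _ _ he']
      · rw [List.getD_eq_default _ _ (by rw [List.length_set]; omega),
          List.getD_eq_default _ _ (by omega)]
  · simp only [hss, false_and, if_false]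
    by_cases hs' : s' < T.length
    · have hs2 : s' < (T.set s ((T.getD s []).set e v)).length := by
        rw [List.length_set]; exact hs'
      rw [List.getD_eq_getElem _ _ hs2, List.getElem_set_ne (by omega),
        List.getD_eq_getElem _ _ hs']
    · have hlen : (T.set s ((T.getD s []).set e v)).length ≤ s' := by
        rw [List.length_set]; omega
      rw [List.getD_eq_default _ _ hlen, List.getD_eq_default _ _ (by omega : T.length ≤ s')]

-- invariant of the inner fold over a duplicate-free list of row indices, all ≤ e < n:
-- lengths are preserved, columns other than e are untouched, untouched rows keep column e,
-- and every processed row s gets the recurrence value read from the ORIGINAL column e-1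
lemma inner_inv (cs : List Char) (e : Nat) (L : List Nat) (T : List (List Bool))
    (hTlen : T.length = cs.length) (hrow : ∀ r ∈ T, r.length = cs.length)
    (he : e < cs.length) (hL : ∀ s ∈ L, s ≤ e) (hnd : L.Nodup) :
    let T' := L.foldl (innerF cs e) T
    T'.length = cs.length ∧ (∀ r ∈ T', r.length = cs.length) ∧
    (∀ s' e', e' ≠ e → tget T' s' e' = tget T s' e') ∧
    (∀ s', s' ∉ L → tget T' s' e = tget T s' e) ∧
    (∀ s ∈ L, tget T' s e
      = ((cs.getD s ' ' == cs.getD e ' ') && (decide (e - s < 2) || tget T (s + 1) (e - 1)))) := by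
  induction L generalizing T with
  | nil => exact ⟨hTlen, hrow, fun _ _ _ => rfl, fun _ _ => rfl, by simp⟩
  | cons s L ih =>
    have hs : s < T.length := by rw [hTlen]; exact lt_of_le_of_lt (hL s (by simp)) he
    have hrowlen : (T.getD s []).length = cs.length := by
      rw [List.getD_eq_getElem _ _ hs]; exact hrow _ (List.getElem_mem hs)
    have hecol : e < (T.getD s []).length := by omega
    have hset := fun s' e' v => tget_set T s e s' e' v hs hecol
    set T1 := innerF cs e T s with hT1
    have hT1len : T1.length = cs.length := by simp [hT1, innerF, hTlen]
    have hT1row : ∀ r ∈ T1, r.length = cs.length := by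
      intro r hr
      rcases List.mem_or_eq_of_mem_set hr with h | h
      · exact hrow r h
      · subst h; rw [List.length_set]; exact hrowlen
    have hL' : ∀ x ∈ L, x ≤ e := fun x hx => hL x (by simp [hx])
    have hnd' : L.Nodup := (List.nodup_cons.mp hnd).2
    have hsn : s ∉ L := (List.nodup_cons.mp hnd).1
    obtain ⟨h1, h2, h3, h4, h5⟩ := ih T1 hT1len hT1row hL' hnd'
    have hT1get : ∀ s' e', tget T1 s' e'
        = if s' = s ∧ e' = e then
            ((cs.getD s ' ' == cs.getD e ' ') && (decide (e - s < 2) || tget T (s + 1) (e - 1)))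
          else tget T s' e' := fun s' e' => hset s' e' _
    have hfold : List.foldl (innerF cs e) T (s :: L) = List.foldl (innerF cs e) T1 L := by
      rw [List.foldl_cons]
    refine ⟨by rw [hfold]; exact h1, by rw [hfold]; exact h2, ?_, ?_, ?_⟩
    · intro s' e' hne
      rw [hfold, h3 s' e' hne, hT1get]
      simp [hne]
    · intro s' hs'
      have hne : s' ≠ s := fun h => hs' (h ▸ by simp)
      rw [hfold, h4 s' (fun h => hs' (by simp [h])), hT1get]
      simp [hne]
    · intro x hx
      rcases List.mem_cons.mp hx with rfl | hx'
      · rw [hfold, h4 x hsn, hT1get]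
        simp
      · rw [hfold, h5 x hx']
        by_cases h2 : e - x < 2
        · simp [h2]
        · have h9 : tget T1 (x + 1) (e - 1) = tget T (x + 1) (e - 1) := by
            rw [hT1get]
            simp [show ¬(e - 1 = e) from by omega]
          rw [h9]

-- the DP table agrees with A's two-pointer test on every in-range entry
lemma table_correct (cs : List Char) :
    ∀ s e, s ≤ e → e < cs.length → tget (buildTable cs) s e = palingdromeA cs s e := by
  suffices h : ∀ m, m ≤ cs.length →
      let Tm := (List.range m).foldl
        (fun T e => ((List.range (e + 1)).reverse).foldl (innerF cs e) T)
        (List.replicate cs.length (List.replicate cs.length false))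
      Tm.length = cs.length ∧ (∀ r ∈ Tm, r.length = cs.length) ∧
      (∀ s e, s ≤ e → e < m → tget Tm s e = palingdromeA cs s e) by
    intro s e hse he
    have := (h cs.length le_rfl).2.2 s e hse he
    rw [← this]
    rfl
  intro m
  induction m with
  | zero =>
    intro _
    refine ⟨by simp, by intro r hr; rw [List.eq_of_mem_replicate hr]; simp, by omega⟩
  | succ m ih =>
    intro hm
    obtain ⟨h1, h2, h3⟩ := ih (by omega)
    rw [List.range_succ, List.foldl_append, List.foldl_cons, List.foldl_nil]
    have hmn : m < cs.length := by omega
    obtain ⟨g1, g2, g3, g4, g5⟩ := inner_inv cs m ((List.range (m + 1)).reverse) _ h1 h2 hmn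
      (by intro s hs; simp at hs; omega) (by simp [List.nodup_range])
    refine ⟨g1, g2, ?_⟩
    intro s e hse he
    by_cases hem : e = m
    · subst hem
      rw [g5 s (by simp; omega), pal_rec cs s e hse]
      by_cases h2' : e - s < 2
      · simp [h2']
      · congr 2
        exact h3 (s + 1) (e - 1) (by omega) (by omega)
    · rw [g3 s e hem]
      exact h3 s e hse (by omega)

-- the two enumeration folds agree
lemma gen_eq (cs : List Char) (init : GenSt) :
    (List.range cs.length).foldl (stepA cs cs.length) init
      = (List.range cs.length).foldl (stepB cs (buildTable cs)) init := by
  apply PySem.List.foldl_congr_mem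
  intro st i hi
  have hin : i < cs.length := List.mem_range.mp hi
  unfold stepA stepB
  rw [table_correct cs 0 i (Nat.zero_le i) hin]
  have hpref : (cs.drop 0).take (i + 1 - 0) = cs.take (i + 1) := by simp
  rw [hpref]
  apply PySem.List.foldl_congr_mem'
  intro j hj st'
  have hjn : j < cs.length := by
    have := (List.mem_range'_1.mp hj).2
    omega
  have hij : i + 1 ≤ j := (List.mem_range'_1.mp hj).1
  rw [table_correct cs (i + 1) j hij hjn]

-- ===== VERDICT (by name: the statement is the Claim_ definition above) =====
theorem threePalindromicSubstrings_spec : Claim_equal_threePalindromicSubstrings := by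
  intro word _
  unfold Spec_threePalindromicSubstrings threePalindromicSubstrings threePalindromicSubstrings_alt
  rw [gen_eq]
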